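-- pv_equiv track=rewrite | github.com/ewangchong/gmail_cleaner | scripts/clean-inbox.py | extract_hierarchy_parents
-- ===== SOURCE A (Python) =====
-- def extract_hierarchy_parents(labels):
--     parents = set()
--     for label in labels:
--         if "/" not in label:
--             continue
--         parts = label.split("/")
--         for i in range(1, len(parts)):
--             parents.add("/".join(parts[:i]))
--     return parents
-- ===== SOURCE B (Python) =====
-- def extract_hierarchy_parents(labels):
--     parents = set()
--     for label in labels:
--         for i, ch in enumerate(label):
--             if ch == "/":
--                 parents.add(label[:i])
--     return parents
-- ===== Notes on version B (the rewrite author's own statement) =====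
-- stated objective: alternative
-- what changed: B drops the split-into-parts list and the range-of-prefix-joins inner loop: it scans each label's characters once and adds label[:i] at every slash position, never building a parts list or re-joining.
import Mathlib
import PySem

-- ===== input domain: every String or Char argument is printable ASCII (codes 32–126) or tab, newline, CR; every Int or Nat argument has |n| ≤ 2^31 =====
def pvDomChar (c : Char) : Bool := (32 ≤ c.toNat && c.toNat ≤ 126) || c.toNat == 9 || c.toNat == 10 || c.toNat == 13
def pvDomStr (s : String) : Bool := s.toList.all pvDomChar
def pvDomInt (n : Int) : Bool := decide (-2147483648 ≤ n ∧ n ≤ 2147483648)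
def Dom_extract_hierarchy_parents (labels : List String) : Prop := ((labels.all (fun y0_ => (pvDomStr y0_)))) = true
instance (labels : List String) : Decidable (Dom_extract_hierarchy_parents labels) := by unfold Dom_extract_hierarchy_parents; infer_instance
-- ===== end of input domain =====

-- B replaces A's split-into-parts + prefix-join loop by a single character scan that adds
-- label[:i] at every slash position (objective: alternative decomposition, same cost).

-- ===== PORT A =====
def extract_hierarchy_parents (labels : List String) : List String :=
  labels.foldl
    (fun parents label =>
      if PySem.Str.isIn "/" label = false then parents   -- if "/" not in label: continue
      else
        -- parts = label.split("/"); sep "/" is nonempty so split? is always `some`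
        let parts := (PySem.Str.split? label "/").getD []
        (PySem.List.pyRange 1 (parts.length : Int) 1).foldl
          (fun parents i =>
            PySem.Set.add parents
              (PySem.Str.join "/" (PySem.List.slice parts none (some i))))
          parents)
    PySem.Set.empty

-- ===== PORT B =====
def extract_hierarchy_parents_alt (labels : List String) : List String :=
  labels.foldl
    (fun parents label =>
      (PySem.List.enumerate label.toList 0).foldl
        (fun parents p =>
          if p.2 = '/' then
            PySem.Set.add parents (PySem.Str.slice label none (some p.1))
          else parents)
        parents)
    PySem.Set.empty

-- ===== PRECONDITION & SPEC =====
def Spec_extract_hierarchy_parents (labels : List String) (out : List String) : Prop := out = extract_hierarchy_parents_alt labels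
instance (labels : List String) (out : List String) : Decidable (Spec_extract_hierarchy_parents labels out) := by unfold Spec_extract_hierarchy_parents; infer_instance

-- ===== CLAIM (what is proved, stated in full; the proofs are below) =====
def Claim_equal_extract_hierarchy_parents : Prop := ∀ (labels : List String), Dom_extract_hierarchy_parents labels → Spec_extract_hierarchy_parents labels (extract_hierarchy_parents labels)

-- ===== LEMMAS AND PROOFS =====

/-- The list of proper '/'-prefixes of `cs`: `cs.take i` for each position `i` with `cs[i] = c`,
in ascending order of `i`.  Both ports add exactly this list (as strings) for each label. -/
def prefs (c : Char) : List Char → List (List Char)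
  | [] => []
  | x :: xs => (if x = c then [[]] else []) ++ (prefs c xs).map (x :: ·)

lemma splitOnP_ne_nil {α : Type} (p : α → Bool) (l : List α) : List.splitOnP p l ≠ [] := by
  induction l with
  | nil => simp [List.splitOnP_nil]
  | cons x xs ih => rw [List.splitOnP_cons]; split <;> simp_all

lemma modifyHead_nil_append (l : List (List Char)) : l.modifyHead (([] : List Char) ++ ·) = l := by
  cases l <;> simp

lemma go_single (c : Char) : ∀ (fuel : Nat) (l cur : List Char) (acc : List (List Char)), l.length < fuel →
    PySem.Chars.splitOn.go [c] fuel l cur acc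
      = acc.reverse ++ (l.splitOn c).modifyHead (cur.reverse ++ ·) := by
  intro fuel
  induction fuel with
  | zero => intro l cur acc h; omega
  | succ fuel ih =>
    intro l cur acc h
    cases l with
    | nil =>
      rw [PySem.Chars.splitOn.go.eq_def]
      simp [List.splitOn, List.splitOnP_nil]
    | cons x rest =>
      rw [PySem.Chars.splitOn.go.eq_def]
      by_cases hx : x = c
      · subst hx
        have hp : [x].isPrefixOf (x :: rest) = true := by simp [List.isPrefixOf]
        simp only [hp, if_true, List.length_singleton, List.drop_one, List.tail_cons]
        rw [ih rest [] (cur.reverse :: acc) (by simpa using Nat.lt_of_succ_lt_succ h)]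
        simp only [List.reverse_nil]
        rw [modifyHead_nil_append]
        simp [List.splitOn, List.splitOnP_cons]
      · have hp : [c].isPrefixOf (x :: rest) = false := by
          simp [List.isPrefixOf]; exact fun h' => hx h'.symm
        simp only [hp, if_false, Bool.false_eq_true]
        rw [ih rest (x :: cur) acc (by simpa using Nat.lt_of_succ_lt_succ h)]
        simp only [List.splitOn, List.splitOnP_cons]
        have hxc : (x == c) = false := by simp [hx]
        rw [hxc]
        simp only [Bool.false_eq_true, if_false, List.modifyHead_modifyHead]
        congr 1
        cases hsp : List.splitOnP (fun b => b == c) rest with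
        | nil => exact absurd hsp (splitOnP_ne_nil _ _)
        | cons hh tt => simp

/-- PySem's fuel-based split with a one-character separator is core `List.splitOn`. -/
lemma splitOn_single (c : Char) (s : List Char) :
    PySem.Chars.splitOn s [c] = s.splitOn c := by
  rw [show PySem.Chars.splitOn s [c] = PySem.Chars.splitOn.go [c] (s.length+1) s [] [] from rfl,
      go_single c (s.length+1) s [] [] (by omega)]
  cases h : List.splitOn c s <;> simp

lemma intercalate_cons_append (x : Char) (p q : List Char) (r : List (List Char)) :
    [x].intercalate ((p ++ q) :: r) = p ++ [x].intercalate (q :: r) := by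
  cases r <;> simp [List.intercalate]

lemma intercalate_nil_cons (x : Char) (q : List Char) (r : List (List Char)) :
    [x].intercalate ([] :: q :: r) = x :: [x].intercalate (q :: r) := by
  simp [List.intercalate]

/-- A's added strings for one label: joins of the first k parts, k = 1 … len(parts)-1. -/
lemma Aside (c : Char) (cs : List Char) :
    (List.range ((cs.splitOn c).length - 1)).map
        (fun k => [c].intercalate ((cs.splitOn c).take (k+1))) = prefs c cs := by
  induction cs with
  | nil => simp [List.splitOn, List.splitOnP_nil, prefs]
  | cons x xs ih =>
    by_cases hx : x = c
    · subst hx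
      obtain ⟨p, pt, hps⟩ : ∃ p pt, xs.splitOn x = p :: pt :=
        List.exists_cons_of_ne_nil (splitOnP_ne_nil _ _)
      have hsp : (x :: xs).splitOn x = [] :: xs.splitOn x := by
        simp [List.splitOn, List.splitOnP_cons]
      rw [hsp, show ([] :: xs.splitOn x).length - 1 = ((xs.splitOn x).length - 1) + 1 by
            rw [hps]; simp,
          List.range_succ_eq_map, List.map_cons, List.map_map]
      have hhead : [x].intercalate (([] :: xs.splitOn x).take (0+1)) = [] := by
        simp [List.intercalate]
      rw [hhead, show prefs x (x :: xs) = [] :: (prefs x xs).map (x :: ·) by simp [prefs]]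
      congr 1
      rw [← ih, List.map_map]
      apply List.map_congr_left
      intro k hk
      simp only [Function.comp_apply, Nat.succ_eq_add_one, hps, List.take_succ_cons,
        intercalate_nil_cons]
    · have hsp : (x :: xs).splitOn c = (xs.splitOn c).modifyHead (x :: ·) := by
        simp [List.splitOn, List.splitOnP_cons, hx]
      obtain ⟨p, pt, hps⟩ : ∃ p pt, xs.splitOn c = p :: pt :=
        List.exists_cons_of_ne_nil (splitOnP_ne_nil _ _)
      rw [hsp, hps]
      simp only [List.modifyHead_cons, List.length_cons]
      simp only [prefs, if_neg hx, List.nil_append, ← ih, hps, List.length_cons, List.map_map]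
      apply List.map_congr_left
      intro k hk
      simp only [Function.comp_apply, List.take_succ_cons,
        show x :: p = [x] ++ p from rfl, intercalate_cons_append]
      simp

/-- B's added char-lists for one label, with the already-consumed prefix `pre` made explicit. -/
lemma Bside (c : Char) : ∀ (cs pre : List Char),
    (PySem.List.enumerate cs (pre.length : Int)).filterMap
        (fun p => if p.2 = c then some (PySem.List.slice (pre ++ cs) none (some p.1)) else none)
      = (prefs c cs).map (pre ++ ·) := by
  intro cs
  induction cs with
  | nil => intro pre; simp [PySem.List.enumerate, prefs]
  | cons x xs ih =>
    intro pre
    rw [show PySem.List.enumerate (x :: xs) (pre.length : Int)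
          = ((pre.length : Int), x) :: PySem.List.enumerate xs ((pre.length : Int) + 1) from rfl]
    rw [List.filterMap_cons]
    have hcast : ((pre.length : Int) + 1) = ((pre ++ [x]).length : Int) := by simp
    have happ : pre ++ x :: xs = (pre ++ [x]) ++ xs := by simp
    have htail :
        (PySem.List.enumerate xs ((pre.length : Int) + 1)).filterMap
            (fun p => if p.2 = c then some (PySem.List.slice (pre ++ x :: xs) none (some p.1)) else none)
          = (prefs c xs).map (fun q => pre ++ (x :: q)) := by
      rw [hcast, happ, ih (pre ++ [x])]
      simp
    by_cases hx : x = c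
    · rw [if_pos hx]
      have hsl : PySem.List.slice (pre ++ x :: xs) none (some (pre.length : Int)) = pre := by
        rw [PySem.List.slice_to (pre ++ x :: xs) (Int.natCast_nonneg pre.length)]
        simp
      rw [hsl, htail]
      simp [prefs, hx]
    · rw [if_neg hx, htail]
      simp [prefs, hx]

lemma prefs_nil_of_not_mem (c : Char) (cs : List Char) (h : c ∉ cs) : prefs c cs = [] := by
  induction cs with
  | nil => rfl
  | cons x xs ih =>
    simp only [List.mem_cons, not_or] at h
    have hxc : x ≠ c := fun hh => h.1 hh.symm
    simp [prefs, hxc, ih h.2]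

lemma foldl_if_add {α β : Type} [BEq β] (P : α → Prop) [DecidablePred P] (f : α → β) :
    ∀ (l : List α) (s : PySem.Set β),
      l.foldl (fun s x => if P x then PySem.Set.add s (f x) else s) s
        = PySem.Set.update s (l.filterMap (fun x => if P x then some (f x) else none)) := by
  intro l
  induction l with
  | nil => intro s; rfl
  | cons x xs ih =>
    intro s
    by_cases h : P x
    · simp only [List.foldl_cons, List.filterMap_cons, if_pos h, ih]
      rfl
    · simp only [List.foldl_cons, List.filterMap_cons, if_neg h, ih]

lemma pyRange_one (n : Nat) :
    PySem.List.pyRange 1 (n : Int) 1 = (List.range (n-1)).map (fun k : Nat => 1 + (k : Int)) := by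
  simp only [PySem.List.pyRange]
  rw [if_neg (by norm_num : (1:Int) ≠ 0)]
  split_ifs with h1 h2
  · have hc : (((n : Int) - 1 + 1 - 1) / 1).toNat = n - 1 := by
      rw [Int.ediv_one]; omega
    rw [hc]
    apply List.map_congr_left
    intro k _
    ring
  · have h0 : n - 1 = 0 := by omega
    simp [h0]
  · exact absurd (by norm_num : (0:Int) < 1) h1
  · exact absurd (by norm_num : (0:Int) < 1) h1

lemma not_mem_of_isIn_false (c : Char) (cs : List Char)
    (h : PySem.Chars.isIn [c] cs = false) : c ∉ cs := by
  intro hm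
  rw [PySem.Chars.isIn_eq_false_iff] at h
  obtain ⟨s, t, rfl⟩ := List.append_of_mem hm
  exact h ⟨s, t, by simp⟩

/-- One label contributes the same updates in both ports. -/
lemma step_eq (parents : PySem.Set String) (label : String) :
    (if PySem.Str.isIn "/" label = false then parents
     else
       let parts := (PySem.Str.split? label "/").getD []
       (PySem.List.pyRange 1 (parts.length : Int) 1).foldl
         (fun parents i =>
           PySem.Set.add parents (PySem.Str.join "/" (PySem.List.slice parts none (some i))))
         parents)
    = (PySem.List.enumerate label.toList 0).foldl
        (fun parents p =>
          if p.2 = '/' then PySem.Set.add parents (PySem.Str.slice label none (some p.1))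
          else parents)
        parents := by
  -- B's side as a Set.update of the prefix list
  have hB :
      (PySem.List.enumerate label.toList 0).foldl
          (fun parents p =>
            if p.2 = '/' then PySem.Set.add parents (PySem.Str.slice label none (some p.1))
            else parents)
          parents
        = PySem.Set.update parents ((prefs '/' label.toList).map String.ofList) := by
    rw [foldl_if_add (fun p : Int × Char => p.2 = '/')
          (fun p => PySem.Str.slice label none (some p.1))]
    congr 1
    have : (PySem.List.enumerate label.toList 0).filterMap
             (fun p => if p.2 = '/' then some (PySem.Str.slice label none (some p.1)) else none)
           = ((PySem.List.enumerate label.toList 0).filterMap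
               (fun p => if p.2 = '/' then some (PySem.List.slice (([] : List Char) ++ label.toList) none (some p.1)) else none)).map
               String.ofList := by
      rw [List.map_filterMap]
      apply List.filterMap_congr
      intro p _
      by_cases h : p.2 = '/'
      · simp only [if_pos h, Option.map_some]
        rfl
      · simp [if_neg h]
    rw [this,
        show ((0 : Int) = (([] : List Char).length : Int)) by simp]
    rw [Bside '/' label.toList []]
    simp
  rw [hB]
  by_cases hin : PySem.Str.isIn "/" label = false
  · rw [if_pos hin]
    have : prefs '/' label.toList = [] :=
      prefs_nil_of_not_mem _ _ (not_mem_of_isIn_false '/' label.toList hin)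
    rw [this]
    rfl
  · rw [if_neg hin]
    -- unpack parts
    have hparts : (PySem.Str.split? label "/").getD []
        = (label.toList.splitOn '/').map String.ofList := by
      show (Option.map _ (PySem.Chars.split? label.toList "/".toList)).getD [] = _
      rw [show "/".toList = ['/'] from rfl]
      rw [show PySem.Chars.split? label.toList ['/']
            = some (PySem.Chars.splitOn label.toList ['/']) from rfl]
      rw [splitOn_single]
      rfl
    simp only [hparts]
    rw [← PySem.Set.update_map_eq_foldl_add]
    congr 1
    rw [List.length_map, pyRange_one, List.map_map, ← Aside '/' label.toList, List.map_map]
    apply List.map_congr_left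
    intro k hk
    simp only [Function.comp_apply]
    rw [PySem.List.slice_to ((label.toList.splitOn '/').map String.ofList)
          (by omega : (0:Int) ≤ 1 + (k:Int))]
    rw [show ((1:Int) + (k:Int)).toNat = k + 1 by omega]
    rw [← List.map_take]
    simp [PySem.Str.join, PySem.Chars.join, Function.comp_def]

-- ===== VERDICT (by name: the statement is the Claim_ definition above) =====
theorem extract_hierarchy_parents_spec : Claim_equal_extract_hierarchy_parents := by
  intro labels _
  unfold Spec_extract_hierarchy_parents extract_hierarchy_parents extract_hierarchy_parents_alt
  congr 1
  funext parents label
  exact step_eq parents label
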